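-- pv_equiv track=rewrite | github.com/993030293/admission-browser-agent | src/admission_browser_agent/extractor.py | _has_academic_requirement_content
-- ===== SOURCE A (Python) =====
-- def _has_academic_requirement_content(text: str) -> bool:
--     return any(
--         keyword in text
--         for keyword in (
--             "bachelor",
--             "degree",
--             "gpa",
--             "honours",
--             "honors",
--             "upper second",
--             "recognized university",
--             "equivalent qualification",
--             "course in",
--             "courses in",
--             "certificate course",
--             "subjects",
--             "related areas",
--             "calculus",
--             "algebra",
--             "programming",
--             "statistics",
--         )
--     )
-- ===== SOURCE B (Python) =====
-- # First-character dispatch table: keywords grouped by their first letter,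
-- # stored as tails; one scan over the text, with only the tails whose first
-- # letter matches the current character ever examined.
-- _TAILS = {
--     "a": ("lgebra",),
--     "b": ("achelor",),
--     "c": ("ourse in", "ourses in", "ertificate course", "alculus"),
--     "d": ("egree",),
--     "e": ("quivalent qualification",),
--     "g": ("pa",),
--     "h": ("onours", "onors"),
--     "p": ("rogramming",),
--     "r": ("ecognized university", "elated areas"),
--     "s": ("ubjects", "tatistics"),
--     "u": ("pper second",),
-- }
--
--
-- def _has_academic_requirement_content(text: str) -> bool:
--     for i, ch in enumerate(text):
--         for tail in _TAILS.get(ch, ()):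
--             if text.startswith(tail, i + 1):
--                 return True
--     return False
-- ===== Notes on version B (the rewrite author's own statement) =====
-- stated objective: alternative
-- what changed: Replaced the chain of 17 independent substring searches with a single scan over text positions driven by a first-character dispatch table (keywords grouped by first letter and stored as tails), so at each position only keywords whose first letter matches the current character are examined.
import Mathlib
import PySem

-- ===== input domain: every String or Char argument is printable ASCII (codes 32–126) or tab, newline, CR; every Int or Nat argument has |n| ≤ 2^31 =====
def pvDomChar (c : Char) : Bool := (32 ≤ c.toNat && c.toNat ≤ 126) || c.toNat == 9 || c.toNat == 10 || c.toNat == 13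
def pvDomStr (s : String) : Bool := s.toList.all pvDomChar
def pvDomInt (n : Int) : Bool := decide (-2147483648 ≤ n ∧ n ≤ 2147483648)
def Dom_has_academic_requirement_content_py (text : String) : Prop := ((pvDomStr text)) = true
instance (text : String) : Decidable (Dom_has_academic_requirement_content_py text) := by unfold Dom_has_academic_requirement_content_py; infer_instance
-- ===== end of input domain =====

-- B replaces the chain of independent per-keyword substring searches by one scan
-- over text positions with a first-letter dispatch table of keyword tails
-- (objective: alternative; same result, different traversal).

-- ===== PORT A =====
-- any(keyword in text for keyword in (...))
def has_academic_requirement_content_py (text : String) : Bool :=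
  ["bachelor", "degree", "gpa", "honours", "honors", "upper second",
   "recognized university", "equivalent qualification", "course in",
   "courses in", "certificate course", "subjects", "related areas",
   "calculus", "algebra", "programming", "statistics"].any
    (fun keyword => PySem.Str.isIn keyword text)

-- ===== PORT B =====
-- _TAILS.get(ch, ()): the literal dict keyed by single characters, ported as a
-- lookup function (exact: the keys are distinct, so first-match lookup is this
-- case analysis)
def pvTails (c : Char) : List String :=
  if c = 'a' then ["lgebra"]
  else if c = 'b' then ["achelor"]
  else if c = 'c' then ["ourse in", "ourses in", "ertificate course", "alculus"]
  else if c = 'd' then ["egree"]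
  else if c = 'e' then ["quivalent qualification"]
  else if c = 'g' then ["pa"]
  else if c = 'h' then ["onours", "onors"]
  else if c = 'p' then ["rogramming"]
  else if c = 'r' then ["ecognized university", "elated areas"]
  else if c = 's' then ["ubjects", "tatistics"]
  else if c = 'u' then ["pper second"]
  else []

-- for i, ch in enumerate(text): for tail in _TAILS.get(ch, ()): if
-- text.startswith(tail, i+1): return True — structural recursion over suffixes
def pvScanB : List Char → Bool
  | [] => false
  | c :: rest =>
      ((pvTails c).any fun t => PySem.Chars.startswith rest t.toList) || pvScanB rest

def has_academic_requirement_content_py_alt (text : String) : Bool :=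
  pvScanB text.toList

-- ===== PRECONDITION & SPEC =====
def Spec_has_academic_requirement_content_py (text : String) (out : Bool) : Prop := out = has_academic_requirement_content_py_alt text
instance (text : String) (out : Bool) : Decidable (Spec_has_academic_requirement_content_py text out) := by unfold Spec_has_academic_requirement_content_py; infer_instance

-- ===== CLAIM =====
def Claim_equal_has_academic_requirement_content_py : Prop := ∀ (text : String), Dom_has_academic_requirement_content_py text → Spec_has_academic_requirement_content_py text (has_academic_requirement_content_py text)

-- ===== LEMMAS AND PROOFS =====

-- the keyword list of A, for the proofs
def pvKws : List String :=
  ["bachelor", "degree", "gpa", "honours", "honors", "upper second",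
   "recognized university", "equivalent qualification", "course in",
   "courses in", "certificate course", "subjects", "related areas",
   "calculus", "algebra", "programming", "statistics"]

-- startswith unfolded one character (both lists nonempty)
lemma pvSwCons (a b : Char) (s p : List Char) :
    PySem.Chars.startswith (a :: s) (b :: p) = ((b == a) && PySem.Chars.startswith s p) := by
  apply Bool.eq_iff_iff.mpr
  simp [PySem.Chars.startswith_iff, List.cons_prefix_cons]

-- the dispatch at one position agrees with trying every keyword there
set_option maxHeartbeats 2000000 in
lemma pvDispatch (c : Char) (rest : List Char) :
    ((pvTails c).any fun t => PySem.Chars.startswith rest t.toList)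
      = pvKws.any (fun k => PySem.Chars.startswith (c :: rest) k.toList) := by
  unfold pvTails pvKws
  split_ifs with h1 h2 h3 h4 h5 h6 h7 h8 h9 h10 h11
  case pos => subst h1; simp [pvSwCons]
  case pos => subst h2; simp [pvSwCons]
  case pos => subst h3; simp [pvSwCons]
  case pos => subst h4; simp [pvSwCons]
  case pos => subst h5; simp [pvSwCons]
  case pos => subst h6; simp [pvSwCons]
  case pos => subst h7; simp [pvSwCons]
  case pos => subst h8; simp [pvSwCons]
  case pos => subst h9; simp [pvSwCons]
  case pos => subst h10; simp [pvSwCons]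
  case pos => subst h11; simp [pvSwCons]
  case neg =>
    have e : ∀ (x : Char), ¬ c = x → (x == c) = false := by
      intro x h; simp; exact fun hx => h hx.symm
    simp [pvSwCons, e 'a' h1, e 'b' h2, e 'c' h3, e 'd' h4, e 'e' h5, e 'g' h6,
      e 'h' h7, e 'p' h8, e 'r' h9, e 's' h10, e 'u' h11]

-- the scan is true iff some keyword starts at some position
lemma pvScanB_true_iff (cs : List Char) :
    pvScanB cs = true ↔ ∃ k ∈ pvKws, ∃ j, k.toList <+: cs.drop j := by
  induction cs with
  | nil =>
      simp only [pvScanB, Bool.false_eq_true, false_iff]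
      rintro ⟨k, hk, j, hp⟩
      have : k.toList = [] := List.prefix_nil.mp (by simpa using hp)
      fin_cases hk <;> simp_all
  | cons c rest ih =>
      simp only [pvScanB, Bool.or_eq_true, pvDispatch, ih, List.any_eq_true,
        PySem.Chars.startswith_iff]
      constructor
      · rintro (⟨k, hk, hp⟩ | ⟨k, hk, j, hp⟩)
        · exact ⟨k, hk, 0, hp⟩
        · exact ⟨k, hk, j + 1, by simpa using hp⟩
      · rintro ⟨k, hk, j, hp⟩
        cases j with
        | zero => exact Or.inl ⟨k, hk, hp⟩
        | succ j => exact Or.inr ⟨k, hk, j, by simpa using hp⟩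

-- ===== VERDICT =====
theorem has_academic_requirement_content_py_spec : Claim_equal_has_academic_requirement_content_py := by
  intro text _
  show has_academic_requirement_content_py text = has_academic_requirement_content_py_alt text
  have ha : has_academic_requirement_content_py text = true ↔
      ∃ k ∈ pvKws, PySem.Chars.isIn k.toList text.toList = true := by
    simp [has_academic_requirement_content_py, pvKws, PySem.Str.isIn]
  have hb : has_academic_requirement_content_py_alt text = true ↔
      ∃ k ∈ pvKws, PySem.Chars.isIn k.toList text.toList = true := by
    rw [has_academic_requirement_content_py_alt, pvScanB_true_iff]
    exact exists_congr fun k => and_congr_right fun _ =>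
      PySem.Chars.exists_prefix_drop_iff_isIn k.toList text.toList
  exact Bool.eq_iff_iff.mpr (ha.trans hb.symm)
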